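-- pv_equiv track=rewrite | github.com/semicontinuity/datatools | datatools/analysis/text/text_classifier.py | collapse_successive_wildcards
-- ===== SOURCE A (Python) =====
-- from typing import Tuple, Iterable, Iterator, Set, Dict, List, Hashable, Any, Sequence, Callable
--
-- def collapse_successive_wildcards(in_pattern: Iterable[str]) -> Tuple[List[str], Any]:
--     out_pattern = []
--     milestone_offsets = []
--     prev_token = ''
--     i = 0
--     for token in in_pattern:
--         if token is None and prev_token is None:
--             continue
--         out_pattern.append(token)
--         if token is not None:
--             milestone_offsets.append(i)
--         i += 1
--         prev_token = token
--     return out_pattern, milestone_offsets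
-- ===== SOURCE B (Python) =====
-- from typing import Tuple, Iterable, Any, List
--
-- def collapse_successive_wildcards(in_pattern: Iterable[str]) -> Tuple[List[str], Any]:
--     # Run-based scan over an indexed snapshot: a whole run of Nones is consumed at
--     # once by an inner index-advancing loop (emitting a single None), non-None
--     # tokens are emitted one by one with their offset taken from len(out_pattern).
--     tokens = list(in_pattern)
--     out_pattern = []
--     milestone_offsets = []
--     n = len(tokens)
--     i = 0
--     while i < n:
--         if tokens[i] is None:
--             out_pattern.append(None)
--             while i < n and tokens[i] is None:
--                 i += 1
--         else:
--             milestone_offsets.append(len(out_pattern))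
--             out_pattern.append(tokens[i])
--             i += 1
--     return out_pattern, milestone_offsets
-- ===== Notes on version B (the rewrite author's own statement) =====
-- stated objective: alternative
-- what changed: B replaces A's per-token pass with prev_token/i bookkeeping by an index-driven run scan over a snapshot list: an inner while loop consumes an entire run of consecutive Nones at once (emitting one None), and non-None tokens are emitted with their offset read from len(out_pattern), so no previous-token flag or separate counter exists.
import Mathlib
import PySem

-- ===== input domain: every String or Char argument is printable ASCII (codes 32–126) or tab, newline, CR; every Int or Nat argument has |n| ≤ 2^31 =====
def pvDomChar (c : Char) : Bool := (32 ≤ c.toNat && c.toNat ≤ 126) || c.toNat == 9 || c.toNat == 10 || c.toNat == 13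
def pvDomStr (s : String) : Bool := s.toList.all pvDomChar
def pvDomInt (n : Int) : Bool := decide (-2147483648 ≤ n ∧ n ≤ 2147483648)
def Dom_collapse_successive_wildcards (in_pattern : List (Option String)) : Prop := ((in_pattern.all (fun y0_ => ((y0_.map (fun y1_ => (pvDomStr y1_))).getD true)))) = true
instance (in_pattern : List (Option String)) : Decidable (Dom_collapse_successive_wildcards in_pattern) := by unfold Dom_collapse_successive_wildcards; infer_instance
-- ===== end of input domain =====

-- B scans runs: an inner loop consumes a whole run of Nones at once (emitting one None),
-- instead of A's per-token prev_token/i bookkeeping (objective: alternative decomposition).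

-- ===== PORT A =====
-- state: (out_pattern, milestone_offsets, prev_token, i); prev_token starts as '' = some ""
def pvStepA (s : List (Option String) × List Int × Option String × Int) (token : Option String) :
    List (Option String) × List Int × Option String × Int :=
  if token.isNone && s.2.2.1.isNone then s
  else (s.1 ++ [token],
        (if token.isSome then s.2.1 ++ [s.2.2.2] else s.2.1),
        token, s.2.2.2 + 1)

def collapse_successive_wildcards (in_pattern : List (Option String)) : List (Option String) × List Int :=
  let st := in_pattern.foldl pvStepA ([], [], some "", 0)
  (st.1, st.2.1)

-- ===== PORT B =====
-- the outer while loop over the remaining suffix; the inner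
-- 'while i < n and tokens[i] is None: i += 1' is the dropWhile skip of the None-run
def pvScan (out : List (Option String)) (offs : List Int) :
    List (Option String) → List (Option String) × List Int
  | [] => (out, offs)
  | none :: rest => pvScan (out ++ [none]) offs (rest.dropWhile (·.isNone))
  | some s :: rest => pvScan (out ++ [some s]) (offs ++ [(out.length : Int)]) rest
termination_by l => l.length
decreasing_by
  · have := List.length_dropWhile_le (fun x : Option String => x.isNone) rest
    simpa using Nat.lt_succ_of_le this
  · simp

def collapse_successive_wildcards_alt (in_pattern : List (Option String)) : List (Option String) × List Int :=
  pvScan [] [] in_pattern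

-- ===== PRECONDITION & SPEC =====
def Spec_collapse_successive_wildcards (in_pattern : List (Option String)) (out : List (Option String) × List Int) : Prop := out = collapse_successive_wildcards_alt in_pattern
instance (in_pattern : List (Option String)) (out : List (Option String) × List Int) : Decidable (Spec_collapse_successive_wildcards in_pattern out) := by unfold Spec_collapse_successive_wildcards; infer_instance

-- ===== CLAIM (what is proved, stated in full; the proofs are below) =====
def Claim_equal_collapse_successive_wildcards : Prop := ∀ (in_pattern : List (Option String)), Dom_collapse_successive_wildcards in_pattern → Spec_collapse_successive_wildcards in_pattern (collapse_successive_wildcards in_pattern)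

-- ===== LEMMAS AND PROOFS =====

-- the head of l is not a None (trivially true for [])
def pvHeadOk (l : List (Option String)) : Prop :=
  match l with
  | none :: _ => False
  | _ => True

theorem pvHeadOk_dropWhile (rest : List (Option String)) :
    pvHeadOk (rest.dropWhile (·.isNone)) := by
  induction rest with
  | nil => trivial
  | cons t r ih =>
    cases t with
    | none => simpa [List.dropWhile] using ih
    | some s => simp [List.dropWhile, pvHeadOk]

-- A skips a whole run of Nones when prev is None
theorem pv_skip_nones (g : List (Option String)) (h : ∀ x ∈ g, x = none)
    (out : List (Option String)) (offs : List Int) (i : Int) :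
    List.foldl pvStepA (out, offs, none, i) g = (out, offs, none, i) := by
  induction g with
  | nil => rfl
  | cons t r ih =>
    have ht : t = none := h t (by simp)
    subst ht
    simp only [List.foldl_cons, pvStepA]
    simpa using ih (fun x hx => h x (by simp [hx]))

theorem pv_main : ∀ (n : Nat) (l : List (Option String)), l.length ≤ n →
    ∀ (out : List (Option String)) (offs : List Int) (prev : Option String),
    (prev.isNone = false ∨ pvHeadOk l) →
    ∃ prev', List.foldl pvStepA (out, offs, prev, (out.length : Int)) l =
      ((pvScan out offs l).1, (pvScan out offs l).2, prev', ((pvScan out offs l).1.length : Int)) := by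
  intro n
  induction n with
  | zero =>
    intro l hl out offs prev _
    have : l = [] := List.length_eq_zero_iff.mp (Nat.le_zero.mp hl)
    subst this
    exact ⟨prev, by simp [pvScan]⟩
  | succ n ih =>
    intro l hl out offs prev hprev
    cases l with
    | nil => exact ⟨prev, by simp [pvScan]⟩
    | cons t rest =>
      cases t with
      | none =>
        have hp : prev.isNone = false := by
          rcases hprev with h | h
          · exact h
          · exact absurd h (by simp [pvHeadOk])
        have hstep : pvStepA (out, offs, prev, (out.length : Int)) none =
            (out ++ [none], offs, none, (out.length : Int) + 1) := by
          simp [pvStepA, hp]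
        have hsplit : rest = rest.takeWhile (·.isNone) ++ rest.dropWhile (·.isNone) :=
          (List.takeWhile_append_dropWhile).symm
        have hall : ∀ x ∈ rest.takeWhile (·.isNone), x = none := by
          intro x hx
          have := List.mem_takeWhile_imp hx
          exact Option.isNone_iff_eq_none.mp (by simpa using this)
        have hlen : (rest.dropWhile (·.isNone)).length ≤ n := by
          have h1 := List.length_dropWhile_le (fun x : Option String => x.isNone) rest
          have : rest.length ≤ n := by simpa using Nat.le_of_succ_le_succ hl
          omega
        have hskip := pv_skip_nones (rest.takeWhile (·.isNone)) hall (out ++ [none]) offs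
          ((out.length : Int) + 1)
        have hrec := ih (rest.dropWhile (·.isNone)) hlen (out ++ [none]) offs none
          (Or.inr (pvHeadOk_dropWhile rest))
        obtain ⟨prev', hrec⟩ := hrec
        refine ⟨prev', ?_⟩
        rw [List.foldl_cons, hstep]
        conv_lhs => rw [hsplit]
        rw [List.foldl_append, hskip]
        have hlc : ((out ++ [none]).length : Int) = (out.length : Int) + 1 := by simp
        rw [← hlc, hrec]
        simp [pvScan]
      | some s =>
        have hstep : pvStepA (out, offs, prev, (out.length : Int)) (some s) =
            (out ++ [some s], offs ++ [(out.length : Int)], some s, (out.length : Int) + 1) := by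
          simp [pvStepA]
        have hlen : rest.length ≤ n := by simpa using Nat.le_of_succ_le_succ hl
        obtain ⟨prev', hrec⟩ := ih rest hlen (out ++ [some s]) (offs ++ [(out.length : Int)])
          (some s) (Or.inl rfl)
        refine ⟨prev', ?_⟩
        rw [List.foldl_cons, hstep]
        have hlc : ((out ++ [some s]).length : Int) = (out.length : Int) + 1 := by simp
        rw [← hlc, hrec]
        simp [pvScan]

-- ===== VERDICT (by name: the statement is the Claim_ definition above) =====
theorem collapse_successive_wildcards_spec : Claim_equal_collapse_successive_wildcards := by
  intro in_pattern _
  unfold Spec_collapse_successive_wildcards collapse_successive_wildcards collapse_successive_wildcards_alt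
  obtain ⟨prev', h⟩ := pv_main in_pattern.length in_pattern le_rfl [] [] (some "") (Or.inl rfl)
  simp only [List.length_nil, Int.natCast_zero] at h
  rw [h]
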